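-- pv_equiv track=rewrite | github.com/mzefic/Repo | 7.26.1.py | sum_wo_1even
-- ===== SOURCE A (Python) =====
-- def sum_wo_1even(x):
--     sum = 0
--     even = 0
--     sum1 = 0
--     for i in x:
--         sum += i
--     for i in x:
--         if i % 2 == 0:
--             even += i
--             break
--     sum1 = sum - even
--     return sum1
-- ===== SOURCE B (Python) =====
-- def sum_wo_1even(x):
--     total = 0
--     even = 0
--     found = False
--     for i in x:
--         total += i
--         if not found and i % 2 == 0:
--             even = i
--             found = True
--     return total - even
-- ===== Notes on version B (the rewrite author's own statement) =====
-- stated objective: alternative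
-- what changed: Merged A's two separate passes (one summing, one break-scanning for the first even) into a single loop carrying (total, even, found) with a boolean flag capturing the first even element once.
import Mathlib
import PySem

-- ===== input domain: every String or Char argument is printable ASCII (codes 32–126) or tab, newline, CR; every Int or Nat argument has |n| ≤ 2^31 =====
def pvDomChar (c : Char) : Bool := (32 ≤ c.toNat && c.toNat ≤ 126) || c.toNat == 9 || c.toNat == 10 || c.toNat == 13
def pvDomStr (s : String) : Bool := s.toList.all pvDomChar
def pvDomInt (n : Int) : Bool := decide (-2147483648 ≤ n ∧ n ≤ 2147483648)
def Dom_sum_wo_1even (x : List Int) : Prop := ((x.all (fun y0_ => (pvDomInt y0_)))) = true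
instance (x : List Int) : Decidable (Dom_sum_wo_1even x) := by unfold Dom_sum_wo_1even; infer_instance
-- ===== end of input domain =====

-- B replaces A's two passes over x by one pass carrying (total, even, found); alternative decomposition, same O(n) cost.

-- ===== PORT A =====
-- second loop of A: 'for i in x: if i % 2 == 0: even += i; break' with accumulator even
def sum_wo_1even_loop2 : List Int → Int → Int
  | [], even => even
  | i :: t, even => if i % 2 == 0 then even + i else sum_wo_1even_loop2 t even

def sum_wo_1even (x : List Int) : Int :=
  let sum := x.foldl (fun s i => s + i) 0
  let even := sum_wo_1even_loop2 x 0
  sum - even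

-- ===== PORT B =====
-- loop body of B: one step over state (total, even, found)
def pvBStep : Int × Int × Bool → Int → Int × Int × Bool :=
  fun st i =>
    let total := st.1 + i
    if !st.2.2 && (i % 2 == 0) then (total, i, true) else (total, st.2.1, st.2.2)

def sum_wo_1even_alt (x : List Int) : Int :=
  let st := x.foldl pvBStep (0, 0, false)
  st.1 - st.2.1

-- ===== PRECONDITION & SPEC =====
def Spec_sum_wo_1even (x : List Int) (out : Int) : Prop := out = sum_wo_1even_alt x
instance (x : List Int) (out : Int) : Decidable (Spec_sum_wo_1even x out) := by unfold Spec_sum_wo_1even; infer_instance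

-- ===== CLAIM (what is proved, stated in full; the proofs are below) =====
def Claim_equal_sum_wo_1even : Prop := ∀ (x : List Int), Dom_sum_wo_1even x → Spec_sum_wo_1even x (sum_wo_1even x)

-- ===== LEMMAS AND PROOFS =====

-- first even element of x, if any
def pvFirstEven? : List Int → Option Int
  | [] => none
  | i :: t => if i % 2 == 0 then some i else pvFirstEven? t

theorem pvLoop2_eq (x : List Int) (e : Int) :
    sum_wo_1even_loop2 x e = e + (pvFirstEven? x).getD 0 := by
  induction x generalizing e with
  | nil => simp [sum_wo_1even_loop2, pvFirstEven?]
  | cons i t ih =>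
    simp only [sum_wo_1even_loop2, pvFirstEven?]
    split <;> simp [ih]

theorem pvBfold_true (x : List Int) (t e : Int) :
    x.foldl pvBStep (t, e, true) = (x.foldl (fun s i => s + i) t, e, true) := by
  induction x generalizing t with
  | nil => rfl
  | cons i r ih => simp [List.foldl, pvBStep, ih]

theorem pvBfold_false (x : List Int) (t e : Int) :
    x.foldl pvBStep (t, e, false) =
      (x.foldl (fun s i => s + i) t, (pvFirstEven? x).getD e, (pvFirstEven? x).isSome) := by
  induction x generalizing t e with
  | nil => rfl
  | cons i r ih =>
    simp only [List.foldl, pvFirstEven?]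
    by_cases h : i % 2 == 0 <;> simp [pvBStep, h, ih, pvBfold_true]

-- ===== VERDICT (by name: the statement is the Claim_ definition above) =====
theorem sum_wo_1even_spec : Claim_equal_sum_wo_1even := by
  intro x _
  show sum_wo_1even x = sum_wo_1even_alt x
  simp [sum_wo_1even, sum_wo_1even_alt, pvBfold_false, pvLoop2_eq]
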